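-- pv_equiv track=rewrite | github.com/IgnacioVelazquez92/conformados_App | tracking/services/import_pdf.py | _split_cliente_subcliente
-- ===== SOURCE A (Python) =====
-- def _split_cliente_subcliente(client_lines: list[str]) -> tuple[str, str]:
--     if not client_lines:
--         return "", ""
--
--     cliente_parts = [client_lines[0]]
--     subcliente_parts: list[str] = []
--     for line in client_lines[1:]:
--         lowered = line.lower()
--         is_cliente_continuation = (
--             line.startswith("(")
--             or lowered.startswith(("y ", "e "))
--             or cliente_parts[-1].endswith((" DE", " DEL", " PARA", " Y"))
--         )
--         if is_cliente_continuation and not subcliente_parts: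
--             cliente_parts.append(line)
--         else:
--             subcliente_parts.append(line)
--
--     return " ".join(cliente_parts), " ".join(subcliente_parts)
-- ===== SOURCE B (Python) =====
-- def _cont(prev: str, line: str) -> bool:
--     lowered = line.lower()
--     return (
--         line.startswith("(")
--         or lowered.startswith(("y ", "e "))
--         or prev.endswith((" DE", " DEL", " PARA", " Y"))
--     )
--
--
-- def _split_cliente_subcliente(client_lines: list[str]) -> tuple[str, str]:
--     if not client_lines:
--         return "", ""
--     # While cliente is still growing, its last part is simply the previous line,
--     # so continuation is a pairwise predicate on adjacent lines.
--     flags = [_cont(p, c) for p, c in zip(client_lines, client_lines[1:])]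
--     try:
--         k = flags.index(False) + 1
--     except ValueError:
--         k = len(client_lines)
--     return " ".join(client_lines[:k]), " ".join(client_lines[k:])
-- ===== Notes on version B (the rewrite author's own statement) =====
-- stated objective: alternative
-- what changed: B exploits that while cliente is still growing its last part is exactly the previous line, so the continuation test is a pure pairwise predicate on adjacent lines: B builds the list of pairwise-continuation flags over zip(lines, lines[1:]), finds the first False to get the boundary k, and returns joined slices lines[:k] / lines[k:] - no growing accumulator, no flag state, replacing A's stateful single pass by staged map/index/slice passes.
import Mathlib
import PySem

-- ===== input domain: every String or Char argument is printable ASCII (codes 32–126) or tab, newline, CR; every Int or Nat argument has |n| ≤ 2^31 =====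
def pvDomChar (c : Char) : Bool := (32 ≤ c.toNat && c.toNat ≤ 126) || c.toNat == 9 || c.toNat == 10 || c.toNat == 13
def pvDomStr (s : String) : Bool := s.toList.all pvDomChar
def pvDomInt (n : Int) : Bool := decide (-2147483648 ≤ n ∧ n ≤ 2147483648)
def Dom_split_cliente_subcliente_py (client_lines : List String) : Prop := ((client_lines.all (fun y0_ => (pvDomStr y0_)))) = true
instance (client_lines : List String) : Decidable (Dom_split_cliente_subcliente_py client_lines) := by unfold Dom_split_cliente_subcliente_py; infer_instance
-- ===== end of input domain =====

-- B replaces A's stateful flag-driven pass by staged passes: pairwise-continuation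
-- flags over adjacent lines, index of the first False as boundary k, joined slices.

-- ===== PORT A =====
-- A's loop body: exact transliteration; cliente_parts[-1] is getLastD "" (cliente is never empty).
def pvStepA (st : List String × List String) (line : String) : List String × List String :=
  let lowered := PySem.Str.lower line
  let is_cliente_continuation :=
    PySem.Str.startswith line "(" ||
    (PySem.Str.startswith lowered "y " || PySem.Str.startswith lowered "e ") ||
    (PySem.Str.endswith (st.1.getLastD "") " DE" || PySem.Str.endswith (st.1.getLastD "") " DEL" ||
     PySem.Str.endswith (st.1.getLastD "") " PARA" || PySem.Str.endswith (st.1.getLastD "") " Y")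
  if is_cliente_continuation && st.2.isEmpty then (st.1 ++ [line], st.2)
  else (st.1, st.2 ++ [line])

def split_cliente_subcliente_py (client_lines : List String) : String × String :=
  match client_lines with
  | [] => ("", "")
  | first :: rest =>
    let st := rest.foldl pvStepA ([first], ([] : List String))
    (PySem.Str.join " " st.1, PySem.Str.join " " st.2)

-- ===== PORT B =====
def pvCont (prev line : String) : Bool :=
  let lowered := PySem.Str.lower line
  PySem.Str.startswith line "(" ||
  (PySem.Str.startswith lowered "y " || PySem.Str.startswith lowered "e ") ||
  (PySem.Str.endswith prev " DE" || PySem.Str.endswith prev " DEL" ||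
   PySem.Str.endswith prev " PARA" || PySem.Str.endswith prev " Y")

def split_cliente_subcliente_py_alt (client_lines : List String) : String × String :=
  match client_lines with
  | [] => ("", "")
  | _ :: _ =>
    let flags := (client_lines.zip client_lines.tail).map (fun pc => pvCont pc.1 pc.2)
    let k := match PySem.List.index? flags false with
      | some i => i + 1
      | none => client_lines.length
    (PySem.Str.join " " (client_lines.take k), PySem.Str.join " " (client_lines.drop k))

-- ===== PRECONDITION & SPEC =====
def Spec_split_cliente_subcliente_py (client_lines : List String) (out : String × String) : Prop := out = split_cliente_subcliente_py_alt client_lines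
instance (client_lines : List String) (out : String × String) : Decidable (Spec_split_cliente_subcliente_py client_lines out) := by unfold Spec_split_cliente_subcliente_py; infer_instance

-- ===== CLAIM (what is proved, stated in full; the proofs are below) =====
def Claim_equal_split_cliente_subcliente_py : Prop := ∀ (client_lines : List String), Dom_split_cliente_subcliente_py client_lines → Spec_split_cliente_subcliente_py client_lines (split_cliente_subcliente_py client_lines)

-- ===== LEMMAS AND PROOFS =====

-- length of the longest chain of pairwise continuations starting after p
def pvChainLen (p : String) : List String → Nat
  | [] => 0
  | x :: xs => if pvCont p x then 1 + pvChainLen x xs else 0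

-- A's step on a state with empty subcliente is exactly the pairwise continuation test.
theorem stepA_eq (c : List String) (line : String) :
    pvStepA (c, ([] : List String)) line =
      if pvCont (c.getLastD "") line then (c ++ [line], []) else (c, [line]) := by
  unfold pvStepA pvCont
  simp only [List.isEmpty_nil, Bool.and_true, List.nil_append]

-- Once subcliente is nonempty, A's loop appends every remaining line to it.
theorem foldl_stepA_stuck (rest : List String) :
    ∀ (c s : List String), s ≠ [] →
      rest.foldl pvStepA (c, s) = (c, s ++ rest) := by
  induction rest with
  | nil => intro c s _; simp
  | cons x xs ih =>
    intro c s hs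
    have h2 : s.isEmpty = false := by simpa [List.isEmpty_iff] using hs
    simp only [List.foldl_cons, pvStepA, h2, Bool.and_false, Bool.false_eq_true, if_false]
    rw [ih c (s ++ [x]) (by simp)]
    simp

-- A's fold splits the remaining lines at the pairwise chain length.
theorem foldl_stepA_chain (rest : List String) :
    ∀ (done : List String),
      rest.foldl pvStepA (done, ([] : List String)) =
        (done ++ rest.take (pvChainLen (done.getLastD "") rest),
         rest.drop (pvChainLen (done.getLastD "") rest)) := by
  induction rest with
  | nil => intro done; simp [pvChainLen]
  | cons x xs ih =>
    intro done
    by_cases hc : pvCont (done.getLastD "") x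
    · simp only [List.foldl_cons, stepA_eq, hc, if_true, pvChainLen]
      rw [ih (done ++ [x])]
      simp [Nat.add_comm 1 (pvChainLen x xs)]
    · simp only [List.foldl_cons, stepA_eq, hc, pvChainLen]
      rw [foldl_stepA_stuck _ _ _ (by simp)]
      simp

-- the pairwise flags of f :: rest, recursively
theorem flags_cons (f x : String) (xs : List String) :
    ((f :: x :: xs).zip (x :: xs)).map (fun pc => pvCont pc.1 pc.2) =
      pvCont f x :: ((x :: xs).zip xs).map (fun pc => pvCont pc.1 pc.2) := by
  simp [List.zip]

-- B's boundary search over the flag list computes the chain length.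
theorem index_flags_eq_chain (rest : List String) :
    ∀ (f : String),
      PySem.List.index? (((f :: rest).zip rest).map (fun pc => pvCont pc.1 pc.2)) false =
        (if pvChainLen f rest = rest.length then none else some (pvChainLen f rest)) := by
  induction rest with
  | nil => intro f; simp [pvChainLen, PySem.List.index?_eq_idxOf?]
  | cons x xs ih =>
    intro f
    rw [flags_cons]
    by_cases hc : pvCont f x
    · rw [hc, PySem.List.index?_cons_of_ne _ (by simp), ih x]
      by_cases he : pvChainLen x xs = xs.length
      · simp [pvChainLen, hc, he]; omega
      · have hne : ¬ (pvChainLen f (x :: xs) = (x :: xs).length) := by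
          simp [pvChainLen, hc]; omega
        simp [he, pvChainLen, hc]
        omega
    · have hc' : pvCont f x = false := by simpa using hc
      rw [hc', PySem.List.index?_cons_self]
      simp [pvChainLen, hc']

-- ===== VERDICT (by name: the statement is the Claim_ definition above) =====
theorem split_cliente_subcliente_py_spec : Claim_equal_split_cliente_subcliente_py := by
  intro client_lines _
  unfold Spec_split_cliente_subcliente_py
  match client_lines with
  | [] => rfl
  | first :: rest =>
    simp only [split_cliente_subcliente_py, split_cliente_subcliente_py_alt, List.tail_cons]
    rw [foldl_stepA_chain rest [first], index_flags_eq_chain rest first]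
    have hl : ([first] : List String).getLastD "" = first := by simp
    rw [hl]
    by_cases he : pvChainLen first rest = rest.length
    · simp [he, List.take_of_length_le, List.drop_of_length_le]
    · simp [he, List.take_succ_cons, List.drop_succ_cons]
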